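-- pv_equiv track=rewrite | github.com/hoanglnt/SearchAlgo | source/main.py | update_maze
-- ===== SOURCE A (Python) =====
-- import copy
--
-- def update_maze(maze, opened, visited, path, start, goal):
--     #update maze status after each iteration
--     new_maze = copy.deepcopy(maze)
--     for i in range(len(new_maze)):
--         for j in range(len(new_maze[i])):
--             if [i, j] in visited:
--                 new_maze[i][j] = 'V'
--             if [i, j] in opened:
--                 new_maze[i][j] = 'O'
--             if [i, j] in path:
--                 new_maze[i][j] = 'P'
--             if [i, j] == start:
--                 new_maze[i][j] = 'S'
--             if [i, j] == goal:
--                 new_maze[i][j] = 'G'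
--     return new_maze
-- ===== SOURCE B (Python) =====
-- def update_maze(maze, opened, visited, path, start, goal):
--     # write cells directly from each list in override order; no per-cell membership scans
--     new_maze = [row[:] for row in maze]
--     for cells, ch in ((visited, 'V'), (opened, 'O'), (path, 'P'), ([start], 'S'), ([goal], 'G')):
--         for cell in cells:
--             if len(cell) == 2:
--                 i, j = cell
--                 if 0 <= i < len(new_maze) and 0 <= j < len(new_maze[i]):
--                     new_maze[i][j] = ch
--     return new_maze
-- ===== Notes on version B (the rewrite author's own statement) =====
-- stated objective: faster
-- what changed: Instead of scanning every grid cell and testing its coordinate pair for membership in visited/opened/path (a linear scan per cell), B copies the grid once and iterates directly over the coordinate lists in override order (visited, opened, path, start, goal), writing each in-bounds cell.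
import Mathlib
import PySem

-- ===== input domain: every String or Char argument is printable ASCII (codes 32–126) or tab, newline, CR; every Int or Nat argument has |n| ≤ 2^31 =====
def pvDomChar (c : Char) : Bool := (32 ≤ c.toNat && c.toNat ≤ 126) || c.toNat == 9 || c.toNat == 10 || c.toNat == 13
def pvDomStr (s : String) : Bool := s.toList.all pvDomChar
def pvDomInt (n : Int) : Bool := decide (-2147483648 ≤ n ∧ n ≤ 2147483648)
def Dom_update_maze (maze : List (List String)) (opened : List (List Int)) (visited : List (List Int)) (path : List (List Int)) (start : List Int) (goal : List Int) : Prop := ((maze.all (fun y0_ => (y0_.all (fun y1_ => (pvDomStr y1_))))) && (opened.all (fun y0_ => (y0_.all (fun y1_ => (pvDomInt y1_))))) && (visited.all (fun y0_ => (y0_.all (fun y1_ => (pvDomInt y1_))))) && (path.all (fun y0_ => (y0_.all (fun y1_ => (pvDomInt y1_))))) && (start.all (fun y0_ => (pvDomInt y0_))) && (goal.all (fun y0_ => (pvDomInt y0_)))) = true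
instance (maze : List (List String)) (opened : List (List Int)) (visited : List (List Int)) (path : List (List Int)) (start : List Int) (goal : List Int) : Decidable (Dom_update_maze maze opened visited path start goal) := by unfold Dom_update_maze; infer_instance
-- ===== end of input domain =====

-- B replaces A's per-cell membership scans by direct writes from each coordinate list
-- in override order (a different traversal); same return value, neither program mutates its input.

-- ===== PORT A =====
-- A's nested index loops write each cell independently of the others, so they are
-- ported as an index-aware map over rows and cells; the per-cell body is A's
-- sequence of re-assignments, in A's order.
def update_maze (maze : List (List String)) (opened : List (List Int)) (visited : List (List Int)) (path : List (List Int)) (start : List Int) (goal : List Int) : List (List String) :=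
  maze.mapIdx (fun i row => row.mapIdx (fun j c =>
    let c := if [(i : Int), (j : Int)] ∈ visited then "V" else c
    let c := if [(i : Int), (j : Int)] ∈ opened then "O" else c
    let c := if [(i : Int), (j : Int)] ∈ path then "P" else c
    let c := if [(i : Int), (j : Int)] = start then "S" else c
    if [(i : Int), (j : Int)] = goal then "G" else c))

-- ===== PORT B =====
-- write one cell if it is a length-2 in-bounds coordinate pair (Source B's `put` body)
def pvPut (m : List (List String)) (cell : List Int) (ch : String) : List (List String) :=
  match cell with
  | [i, j] =>
      if 0 ≤ i ∧ i < (m.length : Int) ∧ 0 ≤ j ∧ j < ((m.getD i.toNat []).length : Int) then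
        m.set i.toNat ((m.getD i.toNat []).set j.toNat ch)
      else m
  | _ => m

def update_maze_alt (maze : List (List String)) (opened : List (List Int)) (visited : List (List Int)) (path : List (List Int)) (start : List Int) (goal : List Int) : List (List String) :=
  let m := visited.foldl (fun m c => pvPut m c "V") maze
  let m := opened.foldl (fun m c => pvPut m c "O") m
  let m := path.foldl (fun m c => pvPut m c "P") m
  let m := pvPut m start "S"
  pvPut m goal "G"

-- ===== PRECONDITION & SPEC =====
def Spec_update_maze (maze : List (List String)) (opened : List (List Int)) (visited : List (List Int)) (path : List (List Int)) (start : List Int) (goal : List Int) (out : List (List String)) : Prop := out = update_maze_alt maze opened visited path start goal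
instance (maze : List (List String)) (opened : List (List Int)) (visited : List (List Int)) (path : List (List Int)) (start : List Int) (goal : List Int) (out : List (List String)) : Decidable (Spec_update_maze maze opened visited path start goal out) := by unfold Spec_update_maze; infer_instance

-- ===== CLAIM (what is proved, stated in full; the proofs are below) =====
def Claim_equal_update_maze : Prop := ∀ (maze : List (List String)) (opened : List (List Int)) (visited : List (List Int)) (path : List (List Int)) (start : List Int) (goal : List Int), Dom_update_maze maze opened visited path start goal → Spec_update_maze maze opened visited path start goal (update_maze maze opened visited path start goal)

-- ===== LEMMAS AND PROOFS =====

def pvGet2 (m : List (List String)) (i j : Nat) : String := (m.getD i []).getD j ""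

theorem pvPut_length (m : List (List String)) (c : List Int) (ch : String) :
    (pvPut m c ch).length = m.length := by
  unfold pvPut
  match c with
  | [] => simp
  | [_] => simp
  | [i, j] => dsimp; split <;> simp
  | _ :: _ :: _ :: _ => simp

theorem pvPut_rowlen (m : List (List String)) (c : List Int) (ch : String) (i : Nat) :
    ((pvPut m c ch).getD i []).length = ((m.getD i []).length) := by
  unfold pvPut
  match c with
  | [] => simp
  | [_] => simp
  | [a, b] =>
      dsimp; split
      · rcases Nat.lt_or_ge i m.length with hi | hi
        · by_cases hia : a.toNat = i
          · subst hia
            simp [List.getD_eq_getElem?_getD, hi]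
          · simp [List.getD_eq_getElem?_getD, List.getElem?_set_ne hia]
        · have h1 : (m.set a.toNat ((m[a.toNat]?.getD []).set b.toNat ch))[i]? = none :=
            List.getElem?_eq_none (by simpa using hi)
          have h2 : m[i]? = none := List.getElem?_eq_none hi
          simp [List.getD_eq_getElem?_getD, h1, h2]
      · rfl
  | _ :: _ :: _ :: _ => simp

theorem pvPut_get2 (m : List (List String)) (c : List Int) (ch : String) (i j : Nat)
    (hi : i < m.length) (hj : j < (m.getD i []).length) :
    pvGet2 (pvPut m c ch) i j =
      if c = [(i : Int), (j : Int)] then ch else pvGet2 m i j := by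
  have hrow : m.getD i [] = m[i] := by
    rw [List.getD_eq_getElem?_getD, List.getElem?_eq_getElem hi]; rfl
  have hj' : j < m[i].length := by rw [hrow] at hj; exact hj
  unfold pvPut pvGet2
  match c with
  | [] => simp
  | [_] => simp
  | [a, b] =>
      dsimp
      by_cases hc : [a, b] = [(i : Int), (j : Int)]
      · rw [if_pos hc]
        obtain ⟨ha, hb⟩ : a = (i : Int) ∧ b = (j : Int) := by simpa using hc
        subst ha; subst hb
        rw [if_pos ?_]
        · simp [List.getD_eq_getElem?_getD, hi, hj']
        · refine ⟨Int.natCast_nonneg _, by exact_mod_cast hi, Int.natCast_nonneg _, ?_⟩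
          simp only [Int.toNat_natCast, hrow]
          exact_mod_cast hj'
      · rw [if_neg hc]
        split
        · rename_i hcond
          obtain ⟨ha0, haL, hb0, hbL⟩ := hcond
          by_cases hia : a.toNat = i
          · have ha : a = (i : Int) := by omega
            have hbne : b.toNat ≠ j := by
              intro hbj
              have hb : b = (j : Int) := by omega
              exact hc (by rw [ha, hb])
            subst hia
            simp [List.getD_eq_getElem?_getD, hi,
              List.getElem?_set_ne hbne]
          · simp [List.getD_eq_getElem?_getD, List.getElem?_set_ne hia]
        · rfl
  | _ :: _ :: _ :: _ => simp

theorem pvFold_length (L : List (List Int)) (ch : String) (m : List (List String)) :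
    (L.foldl (fun m c => pvPut m c ch) m).length = m.length := by
  induction L generalizing m with
  | nil => rfl
  | cons c L ih => rw [List.foldl_cons, ih (pvPut m c ch), pvPut_length]

theorem pvFold_rowlen (L : List (List Int)) (ch : String) (m : List (List String)) (i : Nat) :
    ((L.foldl (fun m c => pvPut m c ch) m).getD i []).length = ((m.getD i []).length) := by
  induction L generalizing m with
  | nil => rfl
  | cons c L ih => rw [List.foldl_cons, ih (pvPut m c ch), pvPut_rowlen]

theorem pvFold_get2 (L : List (List Int)) (ch : String) (m : List (List String)) (i j : Nat)
    (hi : i < m.length) (hj : j < (m.getD i []).length) :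
    pvGet2 (L.foldl (fun m c => pvPut m c ch) m) i j =
      if [(i : Int), (j : Int)] ∈ L then ch else pvGet2 m i j := by
  induction L generalizing m with
  | nil => simp
  | cons c L ih =>
      rw [List.foldl_cons,
        ih (pvPut m c ch) (by rw [pvPut_length]; exact hi) (by rw [pvPut_rowlen]; exact hj),
        pvPut_get2 m c ch i j hi hj]
      by_cases hL : [(i : Int), (j : Int)] ∈ L <;> by_cases hcc : c = [(i:Int),(j:Int)] <;>
        simp [hL, hcc, eq_comm]

-- final cell value of B, fully unfolded
theorem pvAlt_get2 (maze : List (List String)) (opened visited path : List (List Int))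
    (start goal : List Int) (i j : Nat) (hi : i < maze.length)
    (hj : j < (maze.getD i []).length) :
    pvGet2 (update_maze_alt maze opened visited path start goal) i j =
      if goal = [(i:Int),(j:Int)] then "G" else
      if start = [(i:Int),(j:Int)] then "S" else
      if [(i:Int),(j:Int)] ∈ path then "P" else
      if [(i:Int),(j:Int)] ∈ opened then "O" else
      if [(i:Int),(j:Int)] ∈ visited then "V" else pvGet2 maze i j := by
  unfold update_maze_alt
  have l1 := pvFold_length visited "V" maze
  have r1 := pvFold_rowlen visited "V" maze i
  set m1 := visited.foldl (fun m c => pvPut m c "V") maze with hm1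
  have l2 := pvFold_length opened "O" m1
  have r2 := pvFold_rowlen opened "O" m1 i
  set m2 := opened.foldl (fun m c => pvPut m c "O") m1 with hm2
  have l3 := pvFold_length path "P" m2
  have r3 := pvFold_rowlen path "P" m2 i
  set m3 := path.foldl (fun m c => pvPut m c "P") m2 with hm3
  have l4 := pvPut_length m3 start "S"
  have r4 := pvPut_rowlen m3 start "S" i
  set m4 := pvPut m3 start "S" with hm4
  have hi4 : i < m4.length := by omega
  have hj4 : j < (m4.getD i []).length := by omega
  rw [pvPut_get2 m4 goal "G" i j hi4 hj4]
  rw [hm4, pvPut_get2 m3 start "S" i j (by omega) (by omega)]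
  rw [hm3, pvFold_get2 path "P" m2 i j (by omega) (by omega)]
  rw [hm2, pvFold_get2 opened "O" m1 i j (by omega) (by omega)]
  rw [hm1, pvFold_get2 visited "V" maze i j hi hj]

theorem pvAlt_length (maze : List (List String)) (opened visited path : List (List Int))
    (start goal : List Int) :
    (update_maze_alt maze opened visited path start goal).length = maze.length := by
  unfold update_maze_alt
  rw [pvPut_length, pvPut_length, pvFold_length, pvFold_length, pvFold_length]

theorem pvAlt_rowlen (maze : List (List String)) (opened visited path : List (List Int))
    (start goal : List Int) (i : Nat) :
    ((update_maze_alt maze opened visited path start goal).getD i []).length =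
      (maze.getD i []).length := by
  unfold update_maze_alt
  rw [pvPut_rowlen, pvPut_rowlen, pvFold_rowlen, pvFold_rowlen, pvFold_rowlen]

-- ===== VERDICT (by name: the statement is the Claim_ definition above) =====
theorem update_maze_spec : Claim_equal_update_maze := by
  intro maze opened visited path start goal _
  unfold Spec_update_maze
  apply List.ext_getElem
  · simp [update_maze, pvAlt_length]
  · intro i hiA hiB
    have hi : i < maze.length := by simpa [update_maze] using hiA
    have hrow : maze.getD i [] = maze[i] := by
      rw [List.getD_eq_getElem?_getD, List.getElem?_eq_getElem hi]; rfl
    have hrowB : (update_maze_alt maze opened visited path start goal).getD i [] =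
        (update_maze_alt maze opened visited path start goal)[i] := by
      rw [List.getD_eq_getElem?_getD, List.getElem?_eq_getElem hiB]; rfl
    apply List.ext_getElem
    · have e2 := pvAlt_rowlen maze opened visited path start goal i
      rw [hrowB, hrow] at e2
      simp [update_maze, e2]
    · intro j hjA hjB
      have hj : j < maze[i].length := by simpa [update_maze] using hjA
      have hj' : j < (maze.getD i []).length := by rw [hrow]; exact hj
      have hB : (update_maze_alt maze opened visited path start goal)[i][j] =
          pvGet2 (update_maze_alt maze opened visited path start goal) i j := by
        unfold pvGet2
        rw [hrowB, List.getD_eq_getElem?_getD, List.getElem?_eq_getElem hjB]; rfl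
      rw [hB, pvAlt_get2 maze opened visited path start goal i j hi hj']
      have hA : (update_maze maze opened visited path start goal)[i][j] =
          (let c := if [(i : Int), (j : Int)] ∈ visited then "V" else maze[i][j]
           let c := if [(i : Int), (j : Int)] ∈ opened then "O" else c
           let c := if [(i : Int), (j : Int)] ∈ path then "P" else c
           let c := if [(i : Int), (j : Int)] = start then "S" else c
           if [(i : Int), (j : Int)] = goal then "G" else c) := by
        simp [update_maze]
      rw [hA]
      have horig : pvGet2 maze i j = maze[i][j] := by
        unfold pvGet2
        rw [hrow, List.getD_eq_getElem?_getD, List.getElem?_eq_getElem hj]; rfl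
      rw [horig]
      dsimp only
      simp only [show ∀ x : List Int, ([(i:Int),(j:Int)] = x) ↔ x = [(i:Int),(j:Int)] from
        fun _ => eq_comm]
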